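-- pv_equiv track=rewrite | github.com/klee972/exec-filter | nlvr/allennlp-semparse-nlvr-v2/scripts/nlvr_v2/paired_supervision/generate_paired_data.py | get_contained_span
-- ===== SOURCE A (Python) =====
-- from typing import List, Dict, Tuple
--
-- def get_contained_span(sentence: str, phrases: List[str]) -> Tuple[int, int]:
--     """Get the position of the longest contained span in the sentence from a span in phrases."""
--     # Sorting phrases in decreasing order of length; to select "yellow squares" over "yellow square"
--     sorted_phrases = sorted(phrases, key=lambda x: len(x), reverse=True)
--     char_offsets = [-1, -1]
--     for phrase in sorted_phrases:
--         start_position = sentence.find(phrase)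
--         if start_position == -1:
--             # not found
--             continue
--         char_offsets = [start_position, start_position + len(phrase)]
--     return char_offsets
-- ===== SOURCE B (Python) =====
-- from typing import List, Tuple
--
-- def get_contained_span(sentence: str, phrases: List[str]) -> Tuple[int, int]:
--     """Single pass over phrases in original order, tracking the shortest found
--     phrase (later ties win, matching A's stable descending sort + overwrite)."""
--     best_len = None
--     char_offsets = [-1, -1]
--     for phrase in phrases:
--         start = sentence.find(phrase)
--         if start != -1 and (best_len is None or len(phrase) <= best_len):
--             best_len = len(phrase)
--             char_offsets = [start, start + len(phrase)]
--     return char_offsets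
-- ===== Notes on version B (the rewrite author's own statement) =====
-- stated objective: simpler
-- what changed: Drops the descending-length sort entirely: a single pass over phrases in original order keeps the shortest found phrase so far (ties overwritten, reproducing the stable-sort tie rule), instead of sorting and letting every found phrase overwrite.
import Mathlib
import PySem

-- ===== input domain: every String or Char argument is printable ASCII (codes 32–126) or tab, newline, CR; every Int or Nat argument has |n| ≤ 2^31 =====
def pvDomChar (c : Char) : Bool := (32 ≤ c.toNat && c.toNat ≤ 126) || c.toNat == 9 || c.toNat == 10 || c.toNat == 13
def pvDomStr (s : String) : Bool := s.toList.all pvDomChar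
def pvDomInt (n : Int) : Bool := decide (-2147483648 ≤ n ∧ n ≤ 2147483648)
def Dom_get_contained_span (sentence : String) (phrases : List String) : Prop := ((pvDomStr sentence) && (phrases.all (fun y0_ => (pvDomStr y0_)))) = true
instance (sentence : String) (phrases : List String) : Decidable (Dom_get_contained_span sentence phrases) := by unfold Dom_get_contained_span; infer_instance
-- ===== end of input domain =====

-- B drops A's descending-length sort: one pass over phrases in original order keeping the
-- shortest found phrase so far (`<=` reproduces the stable-sort tie rule); objective: simpler.

-- ===== PORT A =====
def get_contained_span (sentence : String) (phrases : List String) : List Int :=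
  let sorted_phrases := PySem.List.sorted phrases (fun x => PySem.Str.len x) true
  sorted_phrases.foldl
    (fun char_offsets phrase =>
      let start_position := PySem.Str.find sentence phrase
      if start_position = -1 then char_offsets
      else [start_position, start_position + PySem.Str.len phrase])
    [-1, -1]

-- ===== PORT B =====
def get_contained_span_alt (sentence : String) (phrases : List String) : List Int :=
  (phrases.foldl
    (fun (st : Option Int × List Int) phrase =>
      let start := PySem.Str.find sentence phrase
      if start ≠ -1 ∧ (∀ b ∈ st.1, PySem.Str.len phrase ≤ b) then
        (some (PySem.Str.len phrase), [start, start + PySem.Str.len phrase])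
      else st)
    (none, [-1, -1])).2

-- ===== PRECONDITION & SPEC =====
def Spec_get_contained_span (sentence : String) (phrases : List String) (out : List Int) : Prop := out = get_contained_span_alt sentence phrases
instance (sentence : String) (phrases : List String) (out : List Int) : Decidable (Spec_get_contained_span sentence phrases out) := by unfold Spec_get_contained_span; infer_instance

-- ===== CLAIM (what is proved, stated in full; the proofs are below) =====
def Claim_equal_get_contained_span : Prop := ∀ (sentence : String) (phrases : List String), Dom_get_contained_span sentence phrases → Spec_get_contained_span sentence phrases (get_contained_span sentence phrases)

-- ===== LEMMAS AND PROOFS =====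

-- simp-opaque wrappers (keep goals in one normal form)
def fnd (sentence p : String) : Int := PySem.Str.find sentence p
def slen (p : String) : Int := PySem.Str.len p

-- span resulting from a found phrase
def fSpan (sentence phrase : String) : List Int :=
  [fnd sentence phrase, fnd sentence phrase + slen phrase]

-- A's loop body (definitionally the lambda in the port of A)
def aStep (sentence : String) (c : List Int) (phrase : String) : List Int :=
  if fnd sentence phrase = -1 then c
  else [fnd sentence phrase, fnd sentence phrase + slen phrase]

-- B's loop body (definitionally the lambda in the port of B)
def bStep (sentence : String) (st : Option Int × List Int) (phrase : String) : Option Int × List Int :=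
  if fnd sentence phrase ≠ -1 ∧ (∀ b ∈ st.1, slen phrase ≤ b) then
    (some (slen phrase), [fnd sentence phrase, fnd sentence phrase + slen phrase])
  else st

-- last phrase of the list occurring in the sentence (structural, from the right)
def lastFound (sentence : String) : List String → Option String
  | [] => none
  | a :: t =>
    match lastFound sentence t with
    | some p => some p
    | none => if fnd sentence a = -1 then none else some a

def lfStep (sentence : String) (acc : Option String) (p : String) : Option String :=
  if fnd sentence p = -1 then acc else some p

-- B's champion: last phrase among the found ones of minimal length
def moStep (sentence : String) (acc : Option String) (p : String) : Option String :=
  if fnd sentence p ≠ -1 ∧ (∀ q, acc = some q → slen p ≤ slen q) then some p else acc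

def mo (sentence : String) (l : List String) : Option String :=
  l.foldl (moStep sentence) none

def brender (sentence : String) (m : Option String) : Option Int × List Int :=
  match m with
  | none => (none, [-1, -1])
  | some p => (some (slen p), fSpan sentence p)

lemma foldA_eq (sentence : String) (t : List String) :
    ∀ c, t.foldl (aStep sentence) c = (lastFound sentence t).elim c (fSpan sentence) := by
  induction t with
  | nil => intro c; rfl
  | cons a t ih =>
    intro c
    rw [List.foldl_cons, ih]
    cases hlf : lastFound sentence t with
    | some p => simp [lastFound, hlf]
    | none =>
      by_cases h : fnd sentence a = -1 <;>
        simp [lastFound, hlf, aStep, fSpan, h]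

lemma lastFound_mem (sentence : String) (t : List String) (p : String)
    (h : lastFound sentence t = some p) : p ∈ t := by
  induction t with
  | nil => simp [lastFound] at h
  | cons a t ih =>
    simp only [lastFound] at h
    cases hlf : lastFound sentence t with
    | some q =>
      rw [hlf] at h
      simp only [Option.some.injEq] at h
      subst h
      exact List.mem_cons_of_mem _ (ih hlf)
    | none =>
      rw [hlf] at h
      by_cases hfa : fnd sentence a = -1
      · rw [if_pos hfa] at h; exact absurd h (by simp)
      · rw [if_neg hfa] at h
        simp only [Option.some.injEq] at h
        subst h
        exact List.mem_cons_self

lemma lastFound_cons (sentence a : String) (t : List String) :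
    lastFound sentence (a :: t)
    = match lastFound sentence t with
      | some p => some p
      | none => if fnd sentence a = -1 then none else some a := rfl

-- the key stability lemma: inserting x into a length-descending list moves lastFound
-- exactly the way B's single-pass champion update does
lemma lastFound_insertBy (sentence x : String) (s : List String)
    (hdesc : s.Pairwise (fun a b => slen b ≤ slen a)) :
    lastFound sentence (PySem.List.insertBy (fun a b => decide (slen b < slen a)) x s)
    = if fnd sentence x ≠ -1 ∧ (∀ q, lastFound sentence s = some q → slen x ≤ slen q)
      then some x else lastFound sentence s := by
  induction s with
  | nil =>
    by_cases h : fnd sentence x = -1 <;>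
      simp [PySem.List.insertBy, lastFound, h]
  | cons y ys ih =>
    rw [PySem.List.insertBy]
    by_cases hxy : slen y < slen x
    · -- x is placed in front of y :: ys
      rw [if_pos (decide_eq_true hxy)]
      cases hlf : lastFound sentence (y :: ys) with
      | some p =>
        have hx : lastFound sentence (x :: y :: ys) = some p := by rw [lastFound_cons, hlf]
        have hp : p ∈ y :: ys := lastFound_mem sentence _ _ hlf
        have hple : slen p ≤ slen y := by
          rcases List.mem_cons.mp hp with h | h
          · subst h; exact le_refl _
          · exact (List.pairwise_cons.mp hdesc).1 p h
        rw [hx, if_neg]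
        rintro ⟨-, hall⟩
        have := hall p rfl
        omega
      | none =>
        have hx : lastFound sentence (x :: y :: ys) =
            if fnd sentence x = -1 then none else some x := by rw [lastFound_cons, hlf]
        rw [hx]
        by_cases h : fnd sentence x = -1 <;> simp [h]
    · -- x goes after y
      rw [if_neg (by simpa using hxy)]
      have hdesc' := (List.pairwise_cons.mp hdesc).2
      have heq := ih hdesc'
      cases hlfys : lastFound sentence ys with
      | some p =>
        rw [hlfys] at heq
        have h1 : lastFound sentence (y :: ys) = some p := by rw [lastFound_cons, hlfys]
        rw [h1]
        by_cases hc : fnd sentence x ≠ -1 ∧ slen x ≤ slen p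
        · have h2 : lastFound sentence
              (PySem.List.insertBy (fun a b => decide (slen b < slen a)) x ys) = some x := by
            rw [heq, if_pos ⟨hc.1, fun q hq => by injection hq with e; exact e ▸ hc.2⟩]
          have h3 : lastFound sentence (y ::
              PySem.List.insertBy (fun a b => decide (slen b < slen a)) x ys) = some x := by
            rw [lastFound_cons, h2]
          rw [h3, if_pos ⟨hc.1, fun q hq => by injection hq with e; exact e ▸ hc.2⟩]
        · have h2 : lastFound sentence
              (PySem.List.insertBy (fun a b => decide (slen b < slen a)) x ys) = some p := by
            rw [heq, if_neg]
            rintro ⟨ha, hall⟩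
            exact hc ⟨ha, hall p rfl⟩
          have h3 : lastFound sentence (y ::
              PySem.List.insertBy (fun a b => decide (slen b < slen a)) x ys) = some p := by
            rw [lastFound_cons, h2]
          rw [h3, if_neg]
          rintro ⟨ha, hall⟩
          exact hc ⟨ha, hall p rfl⟩
      | none =>
        rw [hlfys] at heq
        have h1 : lastFound sentence (y :: ys) =
            if fnd sentence y = -1 then none else some y := by rw [lastFound_cons, hlfys]
        rw [h1]
        by_cases hx : fnd sentence x = -1
        · have h2 : lastFound sentence
              (PySem.List.insertBy (fun a b => decide (slen b < slen a)) x ys) = none := by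
            rw [heq, if_neg]
            rintro ⟨hne, -⟩
            exact hne hx
          have h3 : lastFound sentence (y ::
              PySem.List.insertBy (fun a b => decide (slen b < slen a)) x ys) =
              if fnd sentence y = -1 then none else some y := by
            rw [lastFound_cons, h2]
          rw [h3]
          simp [hx]
        · have h2 : lastFound sentence
              (PySem.List.insertBy (fun a b => decide (slen b < slen a)) x ys) = some x := by
            rw [heq, if_pos ⟨hx, by simp⟩]
          have h3 : lastFound sentence (y ::
              PySem.List.insertBy (fun a b => decide (slen b < slen a)) x ys) = some x := by
            rw [lastFound_cons, h2]
          rw [h3]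
          refine (if_pos ⟨hx, fun q hq => ?_⟩).symm
          by_cases hy : fnd sentence y = -1
          · rw [if_pos hy] at hq; exact absurd hq (by simp)
          · rw [if_neg hy] at hq
            injection hq with e
            subst e
            omega

-- lastFound of the descending sort IS B's champion over the original order
lemma lastFound_sorted_eq_mo (sentence : String) (phrases : List String) :
    lastFound sentence (PySem.List.sorted phrases (fun x => PySem.Str.len x) true)
      = mo sentence phrases := by
  induction phrases using List.reverseRecOn with
  | nil => rfl
  | append_singleton l x ih =>
    have hins : PySem.List.sorted (l ++ [x]) (fun x => PySem.Str.len x) true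
        = PySem.List.insertBy (fun a b => decide (slen b < slen a)) x
            (PySem.List.sorted l (fun x => PySem.Str.len x) true) := by
      simp [PySem.List.sorted_rev_eq_foldl_insertBy, List.foldl_append, slen]
    have hdesc : (PySem.List.sorted l (fun x => PySem.Str.len x) true).Pairwise
        (fun a b => slen b ≤ slen a) :=
      PySem.List.sorted_pairwise_rev l (fun x => PySem.Str.len x)
    rw [hins, lastFound_insertBy sentence x _ hdesc, ih]
    have hmo : mo sentence (l ++ [x]) = moStep sentence (mo sentence l) x := by
      simp [mo, List.foldl_append]
    rw [hmo, moStep]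

-- B's fold renders the champion
lemma foldB_eq (sentence : String) (l : List String) :
    l.foldl (bStep sentence) (none, [-1, -1]) = brender sentence (mo sentence l) := by
  induction l using List.reverseRecOn with
  | nil => rfl
  | append_singleton t x ih =>
    rw [List.foldl_append, List.foldl_cons, List.foldl_nil, ih]
    have hmo : mo sentence (t ++ [x]) = moStep sentence (mo sentence t) x := by
      simp [mo, List.foldl_append]
    rw [hmo]
    cases hm : mo sentence t with
    | none =>
      simp only [bStep, brender, moStep, fSpan, Option.mem_def]
      by_cases h : fnd sentence x = -1 <;> simp [h]
    | some p =>
      simp only [bStep, brender, moStep, fSpan, Option.mem_def]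
      by_cases h : fnd sentence x = -1
      · simp [h]
      · by_cases hle : slen x ≤ slen p <;> simp [h, hle]

-- ===== VERDICT (by name: the statement is the Claim_ definition above) =====
theorem get_contained_span_spec : Claim_equal_get_contained_span := by
  intro sentence phrases _
  show get_contained_span sentence phrases = get_contained_span_alt sentence phrases
  have hA : get_contained_span sentence phrases
      = (PySem.List.sorted phrases (fun x => PySem.Str.len x) true).foldl
          (aStep sentence) [-1, -1] := rfl
  have hB : get_contained_span_alt sentence phrases
      = (phrases.foldl (bStep sentence) (none, [-1, -1])).2 := rfl
  rw [hA, hB, foldA_eq, foldB_eq, lastFound_sorted_eq_mo]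
  cases mo sentence phrases <;> rfl
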